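-- pv_equiv track=rewrite | github.com/andreasthiberg/adventofcode | day10.py | check_variations
-- ===== SOURCE A (Python) =====
-- import itertools
--
-- def check_validity(variation):
--     for i in range(1, len(variation)):
--         if variation[i]-variation[i-1] > 3:
--             return False
--     return True
--
-- def check_variations(subsequence):
--     if len(subsequence) == 1 or len(subsequence) == 2:
--         return 1
--     if len(subsequence) == 3:
--         subsequence.pop(1)
--         if check_validity(subsequence):
--             return 2
--         return 1
--     if len(subsequence) == 4 or len(subsequence) == 5:
--         variations = []
--         total = 0
--         variations.append(subsequence.copy())
--         variations.append([subsequence[0], subsequence[-1]])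
--         for i in range(1, len(subsequence)-2):
--             for x in (itertools.combinations(subsequence[1:-1], i)):
--                 newlist = [subsequence[0]]
--                 for y in x:
--                     newlist.append(y)
--                 newlist.append(subsequence[-1])
--                 variations.append(newlist)
--         for variation in variations:
--             if check_validity(variation):
--                 total += 1
--         return total
-- ===== SOURCE B (Python) =====
-- def check_variations(subsequence):
--     n = len(subsequence)
--     if n == 1 or n == 2:
--         return 1
--     if n == 3:
--         subsequence.pop(1)  # A mutates its argument here; side effect preserved
--         return 2 if subsequence[1] - subsequence[0] <= 3 else 1
--     if n == 4 or n == 5: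
--         # DP counting endpoint-preserving valid paths instead of enumerating subsets
--         ways = [1] + [0] * (n - 1)
--         for j in range(1, n):
--             ways[j] = sum(ways[i] for i in range(j) if subsequence[j] - subsequence[i] <= 3)
--         return ways[-1]
-- ===== Notes on version B (the rewrite author's own statement) =====
-- stated objective: alternative
-- what changed: For length-4/5 inputs B counts endpoint-preserving valid subsequences with a dynamic program (ways[j] = sum of ways[i] over i<j with diff <= 3) instead of A's enumeration of all itertools.combinations of the middle elements followed by a validity scan of each variation; the trivial short-length branches are kept.
import Mathlib
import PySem

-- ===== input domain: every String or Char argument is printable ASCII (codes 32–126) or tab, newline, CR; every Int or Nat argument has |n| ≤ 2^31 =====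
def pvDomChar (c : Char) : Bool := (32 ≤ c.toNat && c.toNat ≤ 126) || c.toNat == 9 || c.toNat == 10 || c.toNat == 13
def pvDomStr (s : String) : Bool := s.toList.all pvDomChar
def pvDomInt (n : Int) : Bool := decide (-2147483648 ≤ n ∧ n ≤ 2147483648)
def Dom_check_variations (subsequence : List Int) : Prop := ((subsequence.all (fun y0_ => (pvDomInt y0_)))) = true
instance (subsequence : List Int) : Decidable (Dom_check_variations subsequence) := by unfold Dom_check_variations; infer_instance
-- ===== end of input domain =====

-- B replaces A's itertools.combinations subset enumeration (len 4/5) with a path-counting DP; return-value equivalence only (A pops index 1 of a len-3 argument; the Python B performs the same pop).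


-- ===== PORT A =====
def check_validity (variation : List Int) : Bool :=
  (PySem.List.pyRange 1 variation.length 1).all (fun i =>
    !(decide (PySem.List.pyGetD variation i 0 - PySem.List.pyGetD variation (i - 1) 0 > 3)))

def check_variations (subsequence : List Int) : Option Int :=
  if subsequence.length = 1 ∨ subsequence.length = 2 then some 1
  else if subsequence.length = 3 then
    -- subsequence.pop(1): index 1 in range since length = 3
    match PySem.List.pop? subsequence 1 with
    | some (_, rest) => if check_validity rest then some 2 else some 1
    | none => none
  else if subsequence.length = 4 ∨ subsequence.length = 5 then
    -- indices 0 and -1 in range since length ≥ 4 (pyGetD's default is never used)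
    let first := PySem.List.pyGetD subsequence 0 0
    let last := PySem.List.pyGetD subsequence (-1) 0
    let middle := PySem.List.slice subsequence (some 1) (some (-1))
    let variations := [subsequence, [first, last]] ++
      (PySem.List.pyRange 1 ((subsequence.length : Int) - 2) 1).flatMap (fun i =>
        (PySem.List.combinations middle i.toNat).map (fun x => first :: (x ++ [last])))
    some (variations.foldl (fun total v => if check_validity v then total + 1 else total) 0)
  else none

-- ===== PORT B =====
def check_variations_alt (subsequence : List Int) : Option Int :=
  if subsequence.length = 1 ∨ subsequence.length = 2 then some 1
  else if subsequence.length = 3 then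
    match PySem.List.pop? subsequence 1 with
    | some (_, rest) =>
        if PySem.List.pyGetD rest 1 0 - PySem.List.pyGetD rest 0 0 ≤ 3 then some 2 else some 1
    | none => none
  else if subsequence.length = 4 ∨ subsequence.length = 5 then
    match subsequence with
    | [] => none  -- unreachable: length is 4 or 5
    | h :: t =>
      -- ways: (value, number of valid paths from the first element to it), built left to right
      let ways := t.foldl (fun (acc : List (Int × Int)) v =>
        acc ++ [(v, (acc.map (fun p => if v - p.1 ≤ 3 then p.2 else 0)).sum)]) [(h, 1)]
      some ((ways.getLast?.map Prod.snd).getD 0)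
  else none

-- ===== PRECONDITION & SPEC =====
def Spec_check_variations (subsequence : List Int) (out : Option Int) : Prop := out = check_variations_alt subsequence
instance (subsequence : List Int) (out : Option Int) : Decidable (Spec_check_variations subsequence out) := by unfold Spec_check_variations; infer_instance

-- ===== CLAIM (what is proved, stated in full; the proofs are below) =====
def Claim_equal_check_variations : Prop := ∀ (subsequence : List Int), Dom_check_variations subsequence → Spec_check_variations subsequence (check_variations subsequence)

-- ===== LEMMAS AND PROOFS =====
theorem cv2 (x y : Int) : check_validity [x,y] = !decide (y - x > 3) := by
  rw [check_validity, show ([x,y] : List Int).length = 2 from rfl,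
    show PySem.List.pyRange 1 ((2:Nat):Int) 1 = [1] from by decide]
  simp [PySem.List.pyGetD, PySem.List.pyGet?, PySem.List.pyIdx?]

theorem cv3 (x y z : Int) : check_validity [x,y,z] = (!decide (y - x > 3) && !decide (z - y > 3)) := by
  rw [check_validity, show ([x,y,z] : List Int).length = 3 from rfl,
    show PySem.List.pyRange 1 ((3:Nat):Int) 1 = [1,2] from by decide]
  simp [PySem.List.pyGetD, PySem.List.pyGet?, PySem.List.pyIdx?]

theorem cv4 (w x y z : Int) : check_validity [w,x,y,z] = (!decide (x - w > 3) && !decide (y - x > 3) && !decide (z - y > 3)) := by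
  rw [check_validity, show ([w,x,y,z] : List Int).length = 4 from rfl,
    show PySem.List.pyRange 1 ((4:Nat):Int) 1 = [1,2,3] from by decide]
  simp [PySem.List.pyGetD, PySem.List.pyGet?, PySem.List.pyIdx?, Bool.and_assoc]

theorem cv5 (v w x y z : Int) : check_validity [v,w,x,y,z] = (!decide (w - v > 3) && !decide (x - w > 3) && !decide (y - x > 3) && !decide (z - y > 3)) := by
  rw [check_validity, show ([v,w,x,y,z] : List Int).length = 5 from rfl,
    show PySem.List.pyRange 1 ((5:Nat):Int) 1 = [1,2,3,4] from by decide]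
  simp [PySem.List.pyGetD, PySem.List.pyGet?, PySem.List.pyIdx?, Bool.and_assoc]

theorem fold_count (L : List (List Int)) (n : Int) :
    L.foldl (fun t v => if check_validity v then t+1 else t) n = n + (L.countP check_validity : Int) := by
  induction L generalizing n with
  | nil => simp
  | cons h tl ih =>
      by_cases hc : check_validity h
      · simp [hc, ih]; ring
      · simp [hc, ih]

def pvInd (p : Prop) [Decidable p] : Int := if p then 1 else 0

theorem pvInd_and (p q : Prop) [Decidable p] [Decidable q] : pvInd (p ∧ q) = pvInd p * pvInd q := by
  unfold pvInd; by_cases hp : p <;> by_cases hq : q <;> simp [hp, hq]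

theorem ite_eq_ind (p : Prop) [Decidable p] (x y : Int) : (if p then x else y) = pvInd p * x + (1 - pvInd p) * y := by
  unfold pvInd; by_cases hp : p <;> simp [hp]

set_option maxHeartbeats 1000000 in
theorem cv_eq (s : List Int) : check_variations s = check_variations_alt s := by
  match s with
  | [] => rfl
  | [a] => rfl
  | [a, b] => rfl
  | [a, b, c] =>
      norm_num [check_variations, check_variations_alt, PySem.List.pop?, PySem.List.pyIdx?,
        cv2, PySem.List.pyGetD, PySem.List.pyGet?]
  | [a, b, c, d] =>
      have g1 : PySem.List.pyGetD [a,b,c,d] (-1) 0 = d := by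
        simp [PySem.List.pyGetD, PySem.List.pyGet?_neg_one]
      have g2 : PySem.List.slice [a,b,c,d] (some 1) (some (-1)) = [b,c] := by
        simp [PySem.List.slice, PySem.List.clampIdx]
      have hc1 : PySem.List.combinations [b,c] (1:Nat) = [[b],[c]] := by
        norm_num [PySem.List.combinations_one]
      rw [check_variations, check_variations_alt]
      norm_num [g1, g2, fold_count]
      rw [show PySem.List.pyRange 1 2 1 = [1] from by decide]
      norm_num [show Int.toNat 1 = 1 from rfl, hc1, List.countP_cons, List.countP_nil,
        Function.comp, cv2, cv3, cv4]
      simp only [ite_eq_ind, pvInd_and, mul_one]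
      ring
  | [a, b, c, d, e] =>
      have g1 : PySem.List.pyGetD [a,b,c,d,e] (-1) 0 = e := by
        simp [PySem.List.pyGetD, PySem.List.pyGet?_neg_one]
      have g2 : PySem.List.slice [a,b,c,d,e] (some 1) (some (-1)) = [b,c,d] := by
        simp [PySem.List.slice, PySem.List.clampIdx]
      have hc1 : PySem.List.combinations [b,c,d] (1:Nat) = [[b],[c],[d]] := by
        norm_num [PySem.List.combinations_one]
      have hc2 : PySem.List.combinations [b,c,d] (2:Nat) = [[b,c],[b,d],[c,d]] := by
        rw [show (2:Nat) = 1+1 from rfl]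
        norm_num [PySem.List.combinations_cons_succ, PySem.List.combinations_zero,
          PySem.List.combinations_nil_succ, PySem.List.combinations_one]
      rw [check_variations, check_variations_alt]
      norm_num [g1, g2, fold_count]
      rw [show PySem.List.pyRange 1 3 1 = [1,2] from by decide]
      norm_num [show Int.toNat 1 = 1 from rfl, show Int.toNat 2 = 2 from rfl, hc1, hc2,
        List.countP_cons, List.countP_nil, Function.comp, cv2, cv3, cv4, cv5]
      simp only [ite_eq_ind, pvInd_and, mul_one]
      ring
  | a :: b :: c :: d :: e :: f :: rest =>
      have hlen : (a :: b :: c :: d :: e :: f :: rest).length = rest.length + 6 := by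
        simp [List.length_cons]
      have h12 : ¬(rest.length + 6 = 1 ∨ rest.length + 6 = 2) := by omega
      have h3 : ¬(rest.length + 6 = 3) := by omega
      have h45 : ¬(rest.length + 6 = 4 ∨ rest.length + 6 = 5) := by omega
      rw [check_variations, check_variations_alt, hlen,
        if_neg h12, if_neg h3, if_neg h45, if_neg h12, if_neg h3, if_neg h45]

-- ===== VERDICT (by name: the statement is the Claim_ definition above) =====
theorem check_variations_spec : Claim_equal_check_variations := by
  intro s _
  exact cv_eq s
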